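-- pv_equiv track=rewrite | github.com/arturoornelasb/tibia-bonelord-469-cipher | archive/scripts/analysis/garbled_analysis.py | check_minus_one
-- ===== SOURCE A (Python) =====
-- from collections import Counter
--
-- def check_minus_one(block, words):
--     """Check if block is an anagram of word - 1 letter (block is missing one)"""
--     matches = []
--     for word in words:
--         if len(word) == len(block) + 1:
--             bc = Counter(block)
--             wc = Counter(word)
--             diff = wc - bc
--             if sum(diff.values()) == 1:
--                 missing = list(diff.elements())[0]
--                 matches.append((word, missing))
--     return matches
-- ===== SOURCE B (Python) =====
-- def check_minus_one(block, words):
--     """Check if block is an anagram of word - 1 letter (block is missing one)"""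
--     bs = sorted(block)
--     n = len(block)
--     matches = []
--     for word in words:
--         if len(word) != n + 1:
--             continue
--         ws = sorted(word)
--         i = j = 0
--         missing = None
--         ok = True
--         while i < len(ws):
--             if j < len(bs) and ws[i] == bs[j]:
--                 i += 1
--                 j += 1
--             elif missing is None:
--                 missing = ws[i]
--                 i += 1
--             else:
--                 ok = False
--                 break
--         if ok and j == n:
--             matches.append((word, missing))
--     return matches
-- ===== Notes on version B (the rewrite author's own statement) =====
-- stated objective: alternative
-- what changed: Replaces the per-word Counter subtraction (multiset arithmetic, sum of positive diffs) by sorting block once plus a two-pointer merge of sorted(word) against sorted(block) that finds the single extra character directly.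
import Mathlib
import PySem

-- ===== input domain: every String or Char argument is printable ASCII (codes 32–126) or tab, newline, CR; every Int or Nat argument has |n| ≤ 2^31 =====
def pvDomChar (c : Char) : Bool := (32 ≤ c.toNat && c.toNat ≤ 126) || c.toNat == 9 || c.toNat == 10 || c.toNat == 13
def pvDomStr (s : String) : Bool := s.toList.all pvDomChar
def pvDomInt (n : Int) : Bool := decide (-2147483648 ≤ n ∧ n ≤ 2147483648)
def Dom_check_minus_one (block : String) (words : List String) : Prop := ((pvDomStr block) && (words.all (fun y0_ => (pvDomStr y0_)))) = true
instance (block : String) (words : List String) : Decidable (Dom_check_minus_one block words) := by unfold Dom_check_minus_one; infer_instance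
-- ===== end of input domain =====

-- B replaces the per-word Counter subtraction by sorting block once and running a
-- two-pointer merge of sorted(word) against sorted(block) (alternative algorithm).

-- ===== PORT A =====
-- Counter(word) - Counter(block): CPython keeps the positive differences, iterating
-- self.items(); its second loop (keys of other absent from self with count < 0) is
-- vacuous here because string Counters only hold positive counts, so it is omitted.
def check_minus_one (block : String) (words : List String) : List (String × String) :=
  words.foldl (fun acc word =>
    if PySem.Str.len word = PySem.Str.len block + 1 then
      let bc := PySem.Dict.counter block.toList
      let wc := PySem.Dict.counter word.toList
      let diff := wc.items.foldl (fun d kv =>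
        if 0 < kv.2 - bc.getD kv.1 0 then d.insert kv.1 (kv.2 - bc.getD kv.1 0) else d)
        PySem.Dict.empty
      if diff.values.foldl (· + ·) 0 = 1 then
        -- list(diff.elements())[0]; the none branch is unreachable (the values sum to 1)
        match PySem.List.pyGet?
            (diff.items.flatMap (fun kv => List.replicate kv.2.toNat kv.1)) 0 with
        | some missing => acc ++ [(word, String.ofList [missing])]
        | none => acc
      else acc
    else acc) []

-- ===== PORT B =====
-- the while loop of Source B: (ws-suffix, bs-suffix, missing) ↦ final missing if the word
-- matched (loop ran to i = len(ws) with ok and j = len(bs)), none otherwise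
def cmoMerge : List Char → List Char → Option Char → Option Char
  | [], bs, missing => if bs.isEmpty then missing else none
  | w :: ws, b :: bs, missing =>
      if w = b then cmoMerge ws bs missing
      else match missing with
        | none => cmoMerge ws (b :: bs) (some w)
        | some _ => none
  | w :: ws, [], missing =>
      match missing with
      | none => cmoMerge ws [] (some w)
      | some _ => none

def check_minus_one_alt (block : String) (words : List String) : List (String × String) :=
  let bs := PySem.List.sorted block.toList (fun c => c) false
  words.foldl (fun acc word =>
    if PySem.Str.len word = PySem.Str.len block + 1 then
      match cmoMerge (PySem.List.sorted word.toList (fun c => c) false) bs none with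
      | some c => acc ++ [(word, String.ofList [c])]
      | none => acc
    else acc) []

-- ===== PRECONDITION & SPEC =====
def Spec_check_minus_one (block : String) (words : List String) (out : List (String × String)) : Prop := out = check_minus_one_alt block words
instance (block : String) (words : List String) (out : List (String × String)) : Decidable (Spec_check_minus_one block words out) := by unfold Spec_check_minus_one; infer_instance

-- ===== CLAIM (what is proved, stated in full; the proofs are below) =====
def Claim_equal_check_minus_one : Prop := ∀ (block : String) (words : List String), Dom_check_minus_one block words → Spec_check_minus_one block words (check_minus_one block words)

-- ===== LEMMAS AND PROOFS =====

-- soundness of the merge: a returned char is exactly the extra char (no sortedness needed)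
lemma cmoMerge_sound : ∀ (ws bs : List Char) (cand : Option Char) (c : Char),
    cmoMerge ws bs cand = some c →
    (cand = none ∧ ws.Perm (c :: bs)) ∨ (cand = some c ∧ ws.Perm bs) := by
  intro ws
  induction ws with
  | nil =>
    intro bs cand c h
    cases bs with
    | nil => simp [cmoMerge] at h; subst h; right; exact ⟨rfl, List.Perm.refl _⟩
    | cons b bs => simp [cmoMerge] at h
  | cons w ws ih =>
    intro bs cand c h
    cases bs with
    | nil =>
      cases cand with
      | none =>
        rcases ih [] (some w) c (by simpa [cmoMerge] using h) with ⟨h1, _⟩ | ⟨h1, h2⟩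
        · exact absurd h1 (by simp)
        · obtain rfl : w = c := by simpa using h1
          left
          exact ⟨rfl, (List.perm_cons w).mpr h2⟩
      | some d => simp [cmoMerge] at h
    | cons b bs =>
      by_cases hwb : w = b
      · subst hwb
        rcases ih bs cand c (by simpa [cmoMerge] using h) with ⟨h1, h2⟩ | ⟨h1, h2⟩
        · left
          refine ⟨h1, ?_⟩
          exact ((h2.cons w).trans (List.Perm.swap c w bs)).symm.symm
        · right; exact ⟨h1, h2.cons w⟩
      · cases cand with
        | none =>
          rcases ih (b :: bs) (some w) c (by simpa [cmoMerge, hwb] using h) with ⟨h1, _⟩ | ⟨h1, h2⟩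
          · exact absurd h1 (by simp)
          · obtain rfl : w = c := by simpa using h1
            left; exact ⟨rfl, h2.cons w⟩
        | some d => simp [cmoMerge, hwb] at h

-- equal sorted suffixes with the candidate already found succeed
lemma cmoMerge_self : ∀ (l : List Char) (d : Char), cmoMerge l l (some d) = some d := by
  intro l d
  induction l with
  | nil => simp [cmoMerge]
  | cons x l ih => simpa [cmoMerge] using ih

-- completeness on sorted inputs
lemma cmoMerge_complete : ∀ (ws bs : List Char) (c : Char),
    ws.Pairwise (· ≤ ·) → bs.Pairwise (· ≤ ·) → ws.Perm (c :: bs) →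
    ∃ c', cmoMerge ws bs none = some c' := by
  intro ws
  induction ws with
  | nil => intro bs c _ _ hp; exact absurd hp.length_eq (by simp)
  | cons w ws ih =>
    intro bs c hws hbs hp
    cases bs with
    | nil =>
      obtain ⟨rfl, rfl⟩ : w = c ∧ ws = [] := by
        simpa using List.perm_singleton.mp hp
      exact ⟨w, by simp [cmoMerge]⟩
    | cons b bs =>
      by_cases hwb : w = b
      · subst hwb
        have hp' : ws.Perm (c :: bs) := by
          have : (w :: ws).Perm (w :: c :: bs) := hp.trans (List.Perm.swap w c bs)
          exact (List.perm_cons w).mp this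
        obtain ⟨c', hc'⟩ := ih bs c (List.Pairwise.of_cons hws) (List.Pairwise.of_cons hbs) hp'
        exact ⟨c', by simpa [cmoMerge] using hc'⟩
      · have hwc : w = c := by
          by_contra hne
          have hwmem : w ∈ b :: bs := by
            have : w ∈ c :: b :: bs := hp.subset (by simp)
            simpa [hne] using this
          have hble : b ≤ w := by
            rcases List.mem_cons.mp hwmem with h | h
            · exact le_of_eq h.symm
            · exact List.rel_of_pairwise_cons hbs h
          have hbmem : b ∈ w :: ws := hp.symm.subset (by simp)
          have hwle : w ≤ b := by
            rcases List.mem_cons.mp hbmem with h | h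
            · exact le_of_eq h.symm
            · exact List.rel_of_pairwise_cons hws h
          exact hwb (le_antisymm hwle hble)
        subst hwc
        have hp' : ws.Perm (b :: bs) := (List.perm_cons w).mp hp
        have heq : ws = b :: bs :=
          List.Perm.eq_of_pairwise' (List.Pairwise.of_cons hws) hbs hp'
        refine ⟨w, ?_⟩
        simp only [cmoMerge, if_neg hwb]
        rw [heq]
        exact cmoMerge_self _ _

lemma extra_unique {w b : List Char} {c c' : Char}
    (h1 : w.Perm (c :: b)) (h2 : w.Perm (c' :: b)) : c = c' := by
  have h := (h1.symm.trans h2).count_eq c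
  by_contra hne
  simp [Ne.symm hne] at h

-- ---- small sum arithmetic over lists ----

lemma foldl_add_eq_sum : ∀ (l : List Int) (a : Int), l.foldl (· + ·) a = a + l.sum := by
  intro l
  induction l with
  | nil => simp
  | cons x l ih => intro a; simp [List.foldl_cons, ih, List.sum_cons]; ring

lemma sum_map_addf (S : List Char) (f g : Char → Nat) :
    (S.map (fun k => f k + g k)).sum = (S.map f).sum + (S.map g).sum := by
  induction S with
  | nil => simp
  | cons s S ih => simp [ih]; omega

lemma sum_map_subf (S : List Char) (f g : Char → Int) :
    (S.map (fun k => f k - g k)).sum = (S.map f).sum - (S.map g).sum := by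
  induction S with
  | nil => simp
  | cons s S ih => simp [ih]; ring

lemma cast_sum_map (S : List Char) (f : Char → Nat) :
    (S.map (fun k => (f k : Int))).sum = ((S.map f).sum : Int) := by
  induction S with
  | nil => simp
  | cons s S ih => simp [ih]

lemma sum_ite_mem (x : Char) : ∀ (S : List Char), S.Nodup →
    (S.map (fun k => if k = x then 1 else 0)).sum = if x ∈ S then 1 else 0 := by
  intro S
  induction S with
  | nil => simp
  | cons s S ih =>
    intro hnd
    by_cases hsx : s = x
    · subst hsx
      have hx : s ∉ S := (List.nodup_cons.mp hnd).1
      simp [ih (List.nodup_cons.mp hnd).2, hx]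
    · simp [hsx, ih (List.nodup_cons.mp hnd).2, Ne.symm hsx]

lemma sum_count_filter : ∀ (b S : List Char), S.Nodup →
    (S.map (b.count ·)).sum = (b.filter (fun x => decide (x ∈ S))).length := by
  intro b
  induction b with
  | nil => intro S _; simp
  | cons x b ih =>
    intro S hnd
    have hcount : ∀ k : Char, (x :: b).count k = b.count k + (if k = x then 1 else 0) := by
      intro k; simp [List.count_cons]; by_cases h : x = k <;> simp [h] <;> simp [Ne.symm h]
    calc (S.map ((x :: b).count ·)).sum
        = (S.map (fun k => b.count k + (if k = x then 1 else 0))).sum := by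
          exact congrArg List.sum (List.map_congr_left (fun k _ => hcount k))
      _ = (S.map (b.count ·)).sum + (if x ∈ S then 1 else 0) := by
          rw [sum_map_addf, sum_ite_mem x S hnd]
      _ = ((x :: b).filter (fun y => decide (y ∈ S))).length := by
          rw [ih S hnd]
          by_cases hx : x ∈ S <;> simp [hx]

lemma sum_zero_of_nonneg : ∀ (l : List Int), (∀ x ∈ l, 0 ≤ x) → l.sum = 0 →
    ∀ x ∈ l, x = 0 := by
  intro l
  induction l with
  | nil => simp
  | cons a l ih =>
    intro hpos hsum
    have hl : 0 ≤ l.sum := List.sum_nonneg (fun x hx => hpos x (List.mem_cons_of_mem a hx))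
    have ha : 0 ≤ a := hpos a (List.mem_cons_self)
    rw [List.sum_cons] at hsum
    have ha0 : a = 0 := by omega
    have hl0 : l.sum = 0 := by omega
    intro x hx
    rcases List.mem_cons.mp hx with rfl | hx
    · exact ha0
    · exact ih (fun y hy => hpos y (List.mem_cons_of_mem a hy)) hl0 x hx

-- ---- the structure of A's diff dictionary ----

lemma filterMap_single (c : Char) (x : Char × Int) : ∀ (l : List Char), l.Nodup → c ∈ l →
    l.filterMap (fun k => if k = c then some x else none) = [x] := by
  intro l
  induction l with
  | nil => simp
  | cons a l ih =>
    intro hnd hmem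
    by_cases hac : a = c
    · subst hac
      have hnot : a ∉ l := (List.nodup_cons.mp hnd).1
      have hnil : l.filterMap (fun k => if k = a then some x else none) = [] :=
        List.filterMap_eq_nil_iff.mpr (fun k hk => by
          have : k ≠ a := fun h => hnot (h ▸ hk)
          simp [this])
      simp [hnil]
    · have hmem' : c ∈ l := by
        rcases List.mem_cons.mp hmem with h | h
        · exact absurd h.symm hac
        · exact h
      simp [hac, ih (List.nodup_cons.mp hnd).2 hmem']

lemma snd_sum_filterMap (f : Char → Int) : ∀ (l : List Char),
    ((l.filterMap (fun k => if 0 < f k then some (k, f k) else none)).map (·.2)).sum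
      = (l.map (fun k => max (f k) 0)).sum := by
  intro l
  induction l with
  | nil => simp
  | cons a l ih =>
    by_cases h : 0 < f a
    · have : max (f a) 0 = f a := max_eq_left (le_of_lt h)
      simp [h, ih, this]
    · have : max (f a) 0 = 0 := max_eq_right (by omega)
      simp [h, ih, this]

lemma foldl_cond_insert (f : Char → Int) : ∀ (ks : List Char) (acc : PySem.Dict Char Int),
    ks.Nodup → (∀ k ∈ ks, acc.contains k = false) →
    (ks.foldl (fun d k => if 0 < f k then d.insert k (f k) else d) acc).items
      = acc.items ++ ks.filterMap (fun k => if 0 < f k then some (k, f k) else none) := by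
  intro ks
  induction ks with
  | nil => intro acc _ _; simp
  | cons k ks ih =>
    intro acc hnd hfresh
    by_cases hpos : 0 < f k
    · have hfresh' : ∀ k' ∈ ks, (acc.insert k (f k)).contains k' = false := by
        intro k' hk'
        rw [PySem.Dict.contains_insert]
        have hne : k' ≠ k := fun h => (List.nodup_cons.mp hnd).1 (h ▸ hk')
        simp [hne, hfresh k' (List.mem_cons_of_mem k hk')]
      have hstep := ih (acc.insert k (f k)) (List.nodup_cons.mp hnd).2 hfresh'
      have hitems : (acc.insert k (f k)).items = acc.items ++ [(k, f k)] :=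
        PySem.Dict.items_insert_of_not_contains acc (f k) (hfresh k List.mem_cons_self)
      simp [List.foldl_cons, hpos, hstep, hitems]
    · have hstep := ih acc (List.nodup_cons.mp hnd).2
        (fun k' hk' => hfresh k' (List.mem_cons_of_mem k hk'))
      simp [List.foldl_cons, hpos, hstep]

lemma diff_items (w bl : List Char) :
    ((PySem.Dict.counter w).items.foldl
      (fun d kv => if 0 < kv.2 - (PySem.Dict.counter bl).getD kv.1 0 then
        d.insert kv.1 (kv.2 - (PySem.Dict.counter bl).getD kv.1 0) else d)
      PySem.Dict.empty).items
    = (PySem.Set.ofList w).filterMap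
        (fun k => if 0 < (w.count k : Int) - (bl.count k : Int) then
          some (k, (w.count k : Int) - (bl.count k : Int)) else none) := by
  rw [PySem.Dict.items_counter, List.foldl_map]
  simp only [PySem.Dict.getD_counter]
  have := foldl_cond_insert (fun k => (List.count k w : Int) - (List.count k bl : Int))
    (PySem.Set.ofList w) PySem.Dict.empty (PySem.Set.nodup_ofList w)
    (fun k _ => PySem.Dict.contains_empty k)
  simpa using this

-- ---- characterisation of the positive Counter difference ----

lemma exists_extra_of_counts (w b : List Char) (hlen : w.length = b.length + 1)
    (hcnt : ∀ k, b.count k ≤ w.count k) : ∃ c, w.Perm (c :: b) := by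
  have hsub : b.Subperm w := List.subperm_ext_iff.mpr (fun x _ => hcnt x)
  obtain ⟨c, hc⟩ := hsub.exists_of_length_lt (by omega)
  exact ⟨c, (hc.perm_of_length_le (by simp; omega)).symm⟩

lemma sum_one_exists (w b : List Char) (hlen : w.length = b.length + 1)
    (H : (((PySem.Set.ofList w).filterMap
        (fun k => if 0 < (w.count k : Int) - (b.count k : Int) then
          some (k, (w.count k : Int) - (b.count k : Int)) else none)).map (·.2)).sum = 1) :
    ∃ c, w.Perm (c :: b) := by
  set S := PySem.Set.ofList w with hS
  have hnd : S.Nodup := PySem.Set.nodup_ofList w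
  set f : Char → Int := fun k => (w.count k : Int) - (b.count k : Int) with hf
  have h1 : (S.map (fun k => max (f k) 0)).sum = 1 := by
    rw [← snd_sum_filterMap f S]; exact H
  have hWs : (S.map (fun k => (w.count k : Int))).sum = (w.length : Int) := by
    rw [cast_sum_map, sum_count_filter w S hnd]
    have : w.filter (fun x => decide (x ∈ S)) = w :=
      List.filter_eq_self.mpr (fun a ha => by
        simp [hS, PySem.Set.mem_ofList, ha])
    rw [this]
  have hBs : (S.map (fun k => (b.count k : Int))).sum
      = ((b.filter (fun x => decide (x ∈ S))).length : Int) := by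
    rw [cast_sum_map, sum_count_filter b S hnd]
  have hsumf : (S.map f).sum
      = (w.length : Int) - ((b.filter (fun x => decide (x ∈ S))).length : Int) := by
    rw [hf]; rw [sum_map_subf S _ _, hWs, hBs]
  have hle : (S.map f).sum ≤ 1 := by
    rw [← h1]
    exact List.sum_le_sum (fun k _ => le_max_left (f k) 0)
  have hflen : (b.filter (fun x => decide (x ∈ S))).length ≤ b.length :=
    List.length_filter_le _ _
  have hfeq : (b.filter (fun x => decide (x ∈ S))).length = b.length := by omega
  have hfilter : b.filter (fun x => decide (x ∈ S)) = b :=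
    (show (b.filter (fun x => decide (x ∈ S))).Sublist b from List.filter_sublist).eq_of_length hfeq
  have hmemS : ∀ x ∈ b, x ∈ S := fun x hx => by
    have := List.filter_eq_self.mp hfilter x hx
    simpa using this
  have hzero : (S.map (fun k => max (f k) 0 - f k)).sum = 0 := by
    rw [sum_map_subf S _ _, h1, hsumf, hfeq, hlen]
    push_cast
    ring
  have hterm : ∀ k ∈ S, max (f k) 0 - f k = 0 := by
    intro k hk
    have := sum_zero_of_nonneg (S.map (fun k => max (f k) 0 - f k))
      (fun x hx => by
        obtain ⟨k', _, rfl⟩ := List.mem_map.mp hx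
        have := le_max_left (f k') 0
        omega) hzero
    exact this _ (List.mem_map.mpr ⟨k, hk, rfl⟩)
  have hcnt : ∀ k, b.count k ≤ w.count k := by
    intro k
    by_cases hk : k ∈ S
    · have := hterm k hk
      have hfk : 0 ≤ f k := by omega
      rw [hf] at hfk
      simp only at hfk
      omega
    · have hknw : k ∉ b := fun h => hk (hmemS k h)
      simp [List.count_eq_zero_of_not_mem hknw]
  exact exists_extra_of_counts w b hlen hcnt

lemma diff_of_perm (w b : List Char) (c : Char) (hp : w.Perm (c :: b)) :
    (PySem.Set.ofList w).filterMap
        (fun k => if 0 < (w.count k : Int) - (b.count k : Int) then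
          some (k, (w.count k : Int) - (b.count k : Int)) else none) = [(c, 1)] := by
  have hcnt : ∀ k : Char, w.count k = b.count k + (if k = c then 1 else 0) := by
    intro k
    have h := hp.count_eq k
    simp only [List.count_cons, beq_iff_eq] at h
    rw [h]
    by_cases hkc : k = c
    · simp [hkc]
    · simp [hkc, Ne.symm hkc]
  have hcmem : c ∈ w := by
    have : 0 < w.count c := by rw [hcnt c]; simp
    exact List.count_pos_iff.mp this
  have hcongr : ∀ k ∈ PySem.Set.ofList w,
      (if 0 < (w.count k : Int) - (b.count k : Int) then
        some (k, (w.count k : Int) - (b.count k : Int)) else none)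
      = (if k = c then some (c, (1 : Int)) else none) := by
    intro k _
    by_cases hkc : k = c
    · subst hkc
      have h1 : (w.count k : Int) - (b.count k : Int) = 1 := by
        have := hcnt k; simp at this; push_cast [this]; ring
      simp [h1]
    · have h0 : (w.count k : Int) - (b.count k : Int) = 0 := by
        have := hcnt k; simp [hkc] at this; push_cast [this]; ring
      simp [h0, hkc]
  rw [List.filterMap_congr hcongr]
  exact filterMap_single c (c, 1) _ (PySem.Set.nodup_ofList w)
    ((PySem.Set.mem_ofList w c).mpr hcmem)

-- ---- the two ports agree word by word ----

lemma perword (bl : List Char) (word : String) (hlen : word.toList.length = bl.length + 1)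
    (acc : List (String × String)) :
    (if ((PySem.Dict.counter word.toList).items.foldl (fun d kv =>
        if 0 < kv.2 - (PySem.Dict.counter bl).getD kv.1 0 then
          d.insert kv.1 (kv.2 - (PySem.Dict.counter bl).getD kv.1 0) else d)
        (PySem.Dict.empty : PySem.Dict Char Int)).values.foldl (· + ·) 0 = 1 then
        match PySem.List.pyGet?
            (((PySem.Dict.counter word.toList).items.foldl (fun d kv =>
              if 0 < kv.2 - (PySem.Dict.counter bl).getD kv.1 0 then
                d.insert kv.1 (kv.2 - (PySem.Dict.counter bl).getD kv.1 0) else d)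
              (PySem.Dict.empty : PySem.Dict Char Int)).items.flatMap
              (fun kv => List.replicate kv.2.toNat kv.1)) 0 with
        | some missing => acc ++ [(word, String.ofList [missing])]
        | none => acc
     else acc)
    = (match cmoMerge (PySem.List.sorted word.toList (fun c => c) false)
          (PySem.List.sorted bl (fun c => c) false) none with
       | some c => acc ++ [(word, String.ofList [c])]
       | none => acc) := by
  set w := word.toList with hw
  set ws := PySem.List.sorted w (fun c => c) false with hws
  set bs := PySem.List.sorted bl (fun c => c) false with hbs
  have hwsp : ws.Perm w := PySem.List.sorted_perm w _ false
  have hbsp : bs.Perm bl := PySem.List.sorted_perm bl _ false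
  have hwss : ws.Pairwise (· ≤ ·) := PySem.List.sorted_pairwise w _
  have hbss : bs.Pairwise (· ≤ ·) := PySem.List.sorted_pairwise bl _
  simp only [PySem.Dict.values]
  simp only [diff_items w bl]
  by_cases h : ∃ c, w.Perm (c :: bl)
  · obtain ⟨c, hc⟩ := h
    rw [diff_of_perm w bl c hc]
    have hB : cmoMerge ws bs none = some c := by
      obtain ⟨c', hc'⟩ := cmoMerge_complete ws bs c hwss hbss
        (hwsp.trans (hc.trans (hbsp.symm.cons c)))
      rcases cmoMerge_sound ws bs none c' hc' with ⟨_, hperm⟩ | ⟨habs, _⟩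
      · have : w.Perm (c' :: bl) := (hwsp.symm.trans hperm).trans (hbsp.cons c')
        rw [← extra_unique hc this] at hc'
        exact hc'
      · exact absurd habs (by simp)
    rw [hB]
    norm_num [foldl_add_eq_sum, List.flatMap_cons, PySem.List.pyGet?_zero_cons]
  · have hA : (((PySem.Set.ofList w).filterMap
        (fun k => if 0 < (w.count k : Int) - (bl.count k : Int) then
          some (k, (w.count k : Int) - (bl.count k : Int)) else none)).map (·.2)).foldl
          (· + ·) 0 ≠ 1 := by
      rw [foldl_add_eq_sum]
      intro habs
      exact h (sum_one_exists w bl hlen (by omega))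
    rw [if_neg hA]
    cases hm : cmoMerge ws bs none with
    | none => rfl
    | some c =>
      rcases cmoMerge_sound ws bs none c hm with ⟨_, hperm⟩ | ⟨habs, _⟩
      · exact absurd ⟨c, (hwsp.symm.trans hperm).trans (hbsp.cons c)⟩ h
      · exact absurd habs (by simp)

-- ===== VERDICT (by name: the statement is the Claim_ definition above) =====
theorem check_minus_one_spec : Claim_equal_check_minus_one := by
  intro block words _
  unfold Spec_check_minus_one check_minus_one check_minus_one_alt
  apply List.foldl_ext
  intro acc word _
  by_cases hl : PySem.Str.len word = PySem.Str.len block + 1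
  · rw [if_pos hl, if_pos hl]
    have hlen : word.toList.length = block.toList.length + 1 := by
      rw [PySem.Str.len_eq, PySem.Str.len_eq] at hl
      omega
    exact perword block.toList word hlen acc
  · rw [if_neg hl, if_neg hl]
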